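-- pv_equiv track=rewrite | github.com/SumDimGoy/dnsinfo | dnsinfo.py | parse
-- ===== SOURCE A (Python) =====
-- def parse(domain):
--     """
--     Split domain into queryable parts in reverse.
--
--     Arguments:
--         domain (str): full domain name
--
--     Examples:
--
--         >>> parse('www.google.com')
--         ['.', 'com.', 'google.com.', 'www.google.com.']
--     """
--     parts = domain.split('.')
--     parts.extend('.')
--     parts.reverse()
--     if '' in parts:
--         parts.remove('')
--
--     for i in range(len(parts)-1):
--         if not i:
--             parts[i+1] = parts[i+1]+parts[i]
--             continue
--         parts[i+1] = parts[i+1]+'.'+parts[i]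
--     return parts
-- ===== SOURCE B (Python) =====
-- def parse(domain):
--     """Same result as A; identical preprocessing, but instead of the in-place
--     cumulative mutation each element is computed independently as a
--     join of the reversed slice parts[1:i+1] plus a trailing dot."""
--     parts = domain.split('.')
--     parts.append('.')
--     parts.reverse()
--     if '' in parts:
--         parts.remove('')
--     return [parts[0]] + ['.'.join(reversed(parts[1:i + 1])) + '.'
--                          for i in range(1, len(parts))]
-- ===== Notes on version B (the rewrite author's own statement) =====
-- stated objective: alternative
-- what changed: A threads a cumulative accumulator through the list by in-place index mutation (each cell extends the previously rewritten cell); B keeps the preprocessing but builds a fresh list where every element is computed independently as a join of the reversed slice parts[1:i+1] plus a trailing dot.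
import Mathlib
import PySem

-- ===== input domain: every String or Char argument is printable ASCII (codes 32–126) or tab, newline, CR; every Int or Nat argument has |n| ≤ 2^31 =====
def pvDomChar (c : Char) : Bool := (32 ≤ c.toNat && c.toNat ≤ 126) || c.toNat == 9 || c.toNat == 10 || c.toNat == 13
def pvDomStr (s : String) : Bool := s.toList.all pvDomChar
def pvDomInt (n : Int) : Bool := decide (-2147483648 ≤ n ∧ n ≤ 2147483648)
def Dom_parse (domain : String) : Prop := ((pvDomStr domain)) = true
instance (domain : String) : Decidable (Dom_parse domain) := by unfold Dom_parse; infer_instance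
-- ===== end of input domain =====

-- B builds each suffix independently as a join of a reversed slice instead of
-- A's in-place cumulative mutation of the list (alternative decomposition, same cost).


-- ===== PORT A =====
def parse (domain : String) : List String :=
  let parts := (PySem.Str.split? domain ".").getD []  -- separator "." ≠ "": split? is always `some` here
  let parts := parts ++ ["."]                         -- parts.extend('.') appends the single character '.'
  let parts := parts.reverse
  let parts := if "" ∈ parts then (PySem.List.remove? parts "").getD parts else parts
  (PySem.List.pyRange 0 ((parts.length : Int) - 1) 1).foldl
    (fun l i =>
      if i = 0 then
        PySem.List.pySetD l (i + 1) (PySem.List.pyGetD l (i + 1) "" ++ PySem.List.pyGetD l i "")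
      else
        PySem.List.pySetD l (i + 1) (PySem.List.pyGetD l (i + 1) "" ++ "." ++ PySem.List.pyGetD l i ""))
    parts

-- ===== PORT B =====
def parse_alt (domain : String) : List String :=
  let parts := (PySem.Str.split? domain ".").getD []  -- separator "." ≠ "": split? is always `some` here
  let parts := parts ++ ["."]
  let parts := parts.reverse
  let parts := if "" ∈ parts then (PySem.List.remove? parts "").getD parts else parts
  [PySem.List.pyGetD parts 0 ""] ++
    (PySem.List.pyRange 1 (parts.length : Int) 1).map
      (fun i => PySem.Str.join "." (PySem.List.slice parts (some 1) (some (i + 1))).reverse ++ ".")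

-- ===== PRECONDITION & SPEC =====
def Spec_parse (domain : String) (out : List String) : Prop := out = parse_alt domain
instance (domain : String) (out : List String) : Decidable (Spec_parse domain out) := by unfold Spec_parse; infer_instance

-- ===== CLAIM (what is proved, stated in full; the proofs are below) =====
def Claim_equal_parse : Prop := ∀ (domain : String), Dom_parse domain → Spec_parse domain (parse domain)

-- ===== LEMMAS AND PROOFS =====

-- the value A's cumulative loop threads through the tail of the list
def pvChain (a : String) : List String → List String
  | [] => []
  | x :: xs => (x ++ "." ++ a) :: pvChain (x ++ "." ++ a) xs

-- B's per-index value: join of the reversed prefix plus a trailing dot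
def pvJ (pre : List String) : String := PySem.Str.join "." pre.reverse ++ "."

lemma pvJoin_singleton (x : String) : PySem.Str.join "." [x] = x := by
  simp [PySem.Str.join]

lemma pvJoin_cons (x y : String) (rest : List String) :
    PySem.Str.join "." (x :: y :: rest) = x ++ "." ++ PySem.Str.join "." (y :: rest) := by
  apply String.toList_inj.mp
  simp [PySem.Str.toList_join, PySem.Chars.join_cons_cons]

lemma pvJ_append (pre : List String) (x : String) (h : pre ≠ []) :
    pvJ (pre ++ [x]) = x ++ "." ++ pvJ pre := by
  obtain ⟨y, l, hyl⟩ : ∃ y l, pre.reverse = y :: l := by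
    cases hrev : pre.reverse with
    | nil => exact absurd (by simpa using congrArg List.reverse hrev) h
    | cons y l => exact ⟨y, l, rfl⟩
  simp [pvJ, hyl, pvJoin_cons, String.append_assoc]

lemma pvChain_eq (xs : List String) : ∀ (pre : List String), pre ≠ [] →
    pvChain (pvJ pre) xs = (List.range xs.length).map (fun k => pvJ (pre ++ xs.take (k + 1))) := by
  induction xs with
  | nil => intro pre _; simp [pvChain]
  | cons x xs ih =>
    intro pre hpre
    have hx : x ++ "." ++ pvJ pre = pvJ (pre ++ [x]) := (pvJ_append pre x hpre).symm
    rw [List.length_cons, List.range_succ_eq_map, List.map_cons, List.map_map]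
    show pvChain (pvJ pre) (x :: xs) = pvJ (pre ++ [x]) :: _
    rw [pvChain, hx, ih (pre ++ [x]) (by simp)]
    congr 1
    apply List.map_congr_left
    intro k _
    simp [Function.comp, List.append_assoc]

-- A's loop body
def pvBody (l : List String) (i : Int) : List String :=
  if i = 0 then
    PySem.List.pySetD l (i + 1) (PySem.List.pyGetD l (i + 1) "" ++ PySem.List.pyGetD l i "")
  else
    PySem.List.pySetD l (i + 1) (PySem.List.pyGetD l (i + 1) "" ++ "." ++ PySem.List.pyGetD l i "")

-- invariant of A's index loop: positions before `a` are final, `a` is the running value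
lemma pvLoop_inv (rest : List String) : ∀ (done : List String) (a : String), done ≠ [] →
    (PySem.List.pyRange (done.length : Int) ((done.length : Int) + rest.length) 1).foldl
      pvBody (done ++ a :: rest)
    = done ++ a :: pvChain a rest := by
  induction rest with
  | nil =>
    intro done a _
    rw [show ((done.length : Int) + (([] : List String).length : Int)) = (done.length : Int) by simp,
      PySem.List.pyRange_one_eq_nil (le_refl _)]
    simp [pvChain]
  | cons x xs ih =>
    intro done a hdone
    have hlen : 0 < done.length := List.length_pos_of_ne_nil hdone
    have hne : ((done.length : Int)) ≠ 0 := by omega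
    rw [PySem.List.pyRange_one_cons (by simp), List.foldl_cons]
    have hstep : pvBody (done ++ a :: x :: xs) (done.length : Int)
        = done ++ a :: (x ++ "." ++ a) :: xs := by
      rw [pvBody, if_neg hne]
      have h1 : ((done.length : Int) + 1) = ((done.length + 1 : Nat) : Int) := by push_cast; ring
      rw [h1, PySem.List.pyGetD_natCast, PySem.List.pyGetD_natCast, PySem.List.pySetD_natCast]
      rw [List.getD_append_right _ _ _ _ (by omega), List.getD_append_right _ _ _ _ (by omega)]
      rw [List.set_append, if_neg (by omega)]
      simp
    rw [hstep,
      show done ++ a :: (x ++ "." ++ a) :: xs = (done ++ [a]) ++ (x ++ "." ++ a) :: xs by simp,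
      show ((done.length : Int) + ((x :: xs : List String).length : Int))
          = (((done ++ [a]).length : Int) + (xs.length : Int)) by simp; ring,
      show ((done.length : Int) + 1) = (((done ++ [a]).length : Int)) by simp,
      ih (done ++ [a]) (x ++ "." ++ a) (by simp)]
    simp [pvChain]

-- the preprocessed list always starts with "."
lemma pvPre_shape (xs : List String) :
    ∃ t, (if "" ∈ (xs ++ ["."]).reverse
            then (PySem.List.remove? (xs ++ ["."]).reverse "").getD (xs ++ ["."]).reverse
            else (xs ++ ["."]).reverse) = "." :: t := by
  have hrev : (xs ++ ["."]).reverse = "." :: xs.reverse := by simp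
  rw [hrev]
  by_cases hm : ("" : String) ∈ ("." :: xs.reverse : List String)
  · have hm' : ("" : String) ∈ xs.reverse := by
      rw [List.mem_cons] at hm
      rcases hm with h | h
      · exact absurd h.symm (by decide)
      · exact h
    rw [if_pos hm, PySem.List.remove?_cons_of_ne _ (by decide),
      PySem.List.remove?_eq_some_erase _ _ hm']
    exact ⟨xs.reverse.erase "", rfl⟩
  · rw [if_neg hm]; exact ⟨xs.reverse, rfl⟩

-- both sides, after preprocessing produced "." :: t
lemma pvMain (t : List String) :
    (PySem.List.pyRange 0 (((("." :: t : List String)).length : Int) - 1) 1).foldl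
      pvBody ("." :: t)
    = [PySem.List.pyGetD ("." :: t : List String) 0 ""] ++
        (PySem.List.pyRange 1 ((("." :: t : List String).length : Int)) 1).map
          (fun i => PySem.Str.join "."
              (PySem.List.slice ("." :: t : List String) (some 1) (some (i + 1))).reverse ++ ".") := by
  have hrhs : (PySem.List.pyRange 1 ((("." :: t : List String).length : Int)) 1).map
        (fun i => PySem.Str.join "."
            (PySem.List.slice ("." :: t : List String) (some 1) (some (i + 1))).reverse ++ ".")
      = (List.range t.length).map (fun k => pvJ (t.take (k + 1))) := by
    rw [PySem.List.pyRange_one, List.map_map,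
      show ((("." :: t : List String).length : Int) - 1).toNat = t.length by simp]
    apply List.map_congr_left
    intro k hk
    have hsl : PySem.List.slice ("." :: t : List String) (some 1) (some ((1 + (k : Int)) + 1))
        = t.take (k + 1) := by
      rw [PySem.List.slice_toNat _ (by omega) (by omega)]
      rw [show ((1 + (k : Int)) + 1).toNat = k + 2 by omega]
      simp
    simp only [Function.comp, hsl, pvJ]
  rw [show (((("." :: t : List String)).length : Int) - 1) = (t.length : Int) by simp]
  cases t with
  | nil =>
    rw [show ((([] : List String).length : Int)) = 0 by simp,
      PySem.List.pyRange_one_eq_nil (le_refl _)]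
    simp [PySem.List.pyRange_one_eq_nil]
  | cons x xs =>
    rw [hrhs, PySem.List.pyGetD_zero_cons]
    -- left side: peel off the i = 0 step, then use the loop invariant
    rw [show (((x :: xs : List String).length : Int)) = ((xs.length : Int) + 1) by simp]
    rw [PySem.List.pyRange_one_cons (by omega), List.foldl_cons]
    have hstep0 : pvBody ("." :: x :: xs) 0 = "." :: (x ++ ".") :: xs := by
      rw [pvBody, if_pos rfl]
      rw [show ((0 : Int) + 1) = ((1 : Nat) : Int) by norm_num,
        PySem.List.pyGetD_natCast, PySem.List.pySetD_natCast,
        show ((0 : Int)) = ((0 : Nat) : Int) by norm_num, PySem.List.pyGetD_natCast]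
      simp [List.getD]
    rw [hstep0,
      show "." :: (x ++ ".") :: xs = ["."] ++ (x ++ ".") :: xs from rfl,
      show ((0 : Int) + 1) = (((["."] : List String).length : Int)) by simp,
      show ((xs.length : Int) + 1) = (((["."] : List String).length : Int) + (xs.length : Int)) by simp [add_comm],
      pvLoop_inv xs ["."] (x ++ ".") (by simp)]
    -- right side: the chain equals the per-index joins
    have hJx : pvJ [x] = x ++ "." := by
      simp [pvJ, pvJoin_singleton]
    rw [List.length_cons, List.range_succ_eq_map, List.map_cons, List.map_map]
    congr 1
    rw [show (x ++ ".") = pvJ [x] from hJx.symm, pvChain_eq xs [x] (by simp)]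
    simp [Function.comp_def, List.take_succ_cons]

-- ===== VERDICT (by name: the statement is the Claim_ definition above) =====
theorem parse_spec : Claim_equal_parse := by
  intro domain _
  show parse domain = parse_alt domain
  simp only [parse, parse_alt]
  obtain ⟨t, ht⟩ := pvPre_shape ((PySem.Str.split? domain ".").getD [])
  rw [ht]
  exact pvMain t
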